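-- pv_equiv track=rewrite | github.com/androidx/androidx | development/build_log_simplifier/build_log_simplifier.py | shorten_uninteresting_stack_frames
-- ===== SOURCE A (Python) =====
-- def shorten_uninteresting_stack_frames(lines):
--     result = []
--     prev_line_is_boring = False
--     for line in lines:
--         if line.startswith("\tat org.gradle"):
--             if not prev_line_is_boring:
--                 result.append("\tat org.gradle...\n")
--             prev_line_is_boring = True
--         elif line.startswith("\tat java.base"):
--             if not prev_line_is_boring:
--                 result.append("\tat java.base...\n")
--             prev_line_is_boring = True
--         else:
--             result.append(line)
--             prev_line_is_boring = False
--     return result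
-- ===== SOURCE B (Python) =====
-- from itertools import groupby
--
-- def shorten_uninteresting_stack_frames(lines):
--     def boring(line):
--         return line.startswith("\tat org.gradle") or line.startswith("\tat java.base")
--
--     result = []
--     for is_boring, group in groupby(lines, key=boring):
--         if is_boring:
--             first = next(group)
--             if first.startswith("\tat org.gradle"):
--                 result.append("\tat org.gradle...\n")
--             else:
--                 result.append("\tat java.base...\n")
--         else:
--             result.extend(group)
--     return result
-- ===== Notes on version B (the rewrite author's own statement) =====
-- stated objective: idiomatic
-- what changed: Replaces the per-line prev_line_is_boring state machine with itertools.groupby partitioning the lines into maximal runs keyed by boringness, emitting one summary per boring run (chosen from the run's first line) and non-boring runs unchanged.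
import Mathlib
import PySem

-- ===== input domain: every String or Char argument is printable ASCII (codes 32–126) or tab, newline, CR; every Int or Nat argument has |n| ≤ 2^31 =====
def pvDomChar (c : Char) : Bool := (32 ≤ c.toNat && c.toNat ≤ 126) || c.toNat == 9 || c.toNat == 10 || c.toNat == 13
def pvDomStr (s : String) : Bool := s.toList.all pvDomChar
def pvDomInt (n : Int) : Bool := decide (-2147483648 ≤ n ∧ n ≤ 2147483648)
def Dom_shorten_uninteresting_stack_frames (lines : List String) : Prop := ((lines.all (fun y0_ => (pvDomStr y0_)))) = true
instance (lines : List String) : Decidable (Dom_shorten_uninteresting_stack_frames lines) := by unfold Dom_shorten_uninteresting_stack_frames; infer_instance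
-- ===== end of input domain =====

-- B replaces A's per-line prev_line_is_boring state machine with an explicit partition of the
-- input into maximal runs of boring/non-boring lines (itertools.groupby), emitting one summary
-- per boring run; objective: idiomatic, same cost.


-- ===== PORT A =====
def shorten_uninteresting_stack_frames (lines : List String) : List String :=
  (lines.foldl (fun (st : List String × Bool) line =>
    let (result, prev_line_is_boring) := st
    if PySem.Str.startswith line "\tat org.gradle" then
      ((if !prev_line_is_boring then result ++ ["\tat org.gradle...\n"] else result), true)
    else if PySem.Str.startswith line "\tat java.base" then
      ((if !prev_line_is_boring then result ++ ["\tat java.base...\n"] else result), true)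
    else (result ++ [line], false)) ([], false)).1

-- ===== PORT B =====
-- B-side helpers: classify a line, summary for a boring run (from its first line)
def pvBoring (line : String) : Bool :=
  PySem.Str.startswith line "\tat org.gradle" || PySem.Str.startswith line "\tat java.base"

def pvSummary (first : String) : String :=
  if PySem.Str.startswith first "\tat org.gradle" then "\tat org.gradle...\n" else "\tat java.base...\n"

-- groupby-over-runs: split off the maximal run sharing the first line's boringness
def pvRuns : List String → List String
  | [] => []
  | x :: xs =>
    let run := xs.takeWhile (fun y => pvBoring y == pvBoring x)
    let rest := xs.dropWhile (fun y => pvBoring y == pvBoring x)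
    (if pvBoring x then [pvSummary x] else x :: run) ++ pvRuns rest
termination_by l => l.length
decreasing_by
  have := List.length_dropWhile_le (fun y => pvBoring y == pvBoring x) xs
  simpa [rest] using Nat.lt_succ_of_le this

def shorten_uninteresting_stack_frames_alt (lines : List String) : List String :=
  pvRuns lines

-- ===== PRECONDITION & SPEC =====
def Spec_shorten_uninteresting_stack_frames (lines : List String) (out : List String) : Prop := out = shorten_uninteresting_stack_frames_alt lines
instance (lines : List String) (out : List String) : Decidable (Spec_shorten_uninteresting_stack_frames lines out) := by unfold Spec_shorten_uninteresting_stack_frames; infer_instance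

-- ===== CLAIM (what is proved, stated in full; the proofs are below) =====
def Claim_equal_shorten_uninteresting_stack_frames : Prop := ∀ (lines : List String), Dom_shorten_uninteresting_stack_frames lines → Spec_shorten_uninteresting_stack_frames lines (shorten_uninteresting_stack_frames lines)

-- ===== LEMMAS AND PROOFS =====

-- Proof-side recursive view of A's loop: the suffix it appends from state `prev`
def pvGoA : List String → Bool → List String
  | [], _ => []
  | l :: ls, prev =>
    if PySem.Str.startswith l "\tat org.gradle" then
      (if !prev then ["\tat org.gradle...\n"] else []) ++ pvGoA ls true
    else if PySem.Str.startswith l "\tat java.base" then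
      (if !prev then ["\tat java.base...\n"] else []) ++ pvGoA ls true
    else l :: pvGoA ls false

theorem pvFoldl_eq_goA : ∀ (lines acc : List String) (prev : Bool),
    (lines.foldl (fun (st : List String × Bool) line =>
      let (result, prev_line_is_boring) := st
      if PySem.Str.startswith line "\tat org.gradle" then
        ((if !prev_line_is_boring then result ++ ["\tat org.gradle...\n"] else result), true)
      else if PySem.Str.startswith line "\tat java.base" then
        ((if !prev_line_is_boring then result ++ ["\tat java.base...\n"] else result), true)
      else (result ++ [line], false)) (acc, prev)).1 = acc ++ pvGoA lines prev := by
  intro lines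
  induction lines with
  | nil => intro acc prev; simp [pvGoA]
  | cons l ls ih =>
    intro acc prev
    by_cases h1 : PySem.Str.startswith l "\tat org.gradle" = true
    · simp at h1
      cases prev
      · simp only [List.foldl_cons]
        simp [pvGoA, h1]
        simpa using ih (acc ++ ["\tat org.gradle...\n"]) true
      · simp only [List.foldl_cons]
        simp [pvGoA, h1]
        simpa using ih acc true
    · by_cases h2 : PySem.Str.startswith l "\tat java.base" = true
      · simp at h1 h2
        cases prev
        · simp only [List.foldl_cons]
          simp [pvGoA, h1, h2]
          simpa using ih (acc ++ ["\tat java.base...\n"]) true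
        · simp only [List.foldl_cons]
          simp [pvGoA, h1, h2]
          simpa using ih acc true
      · simp at h1 h2
        simp only [List.foldl_cons]
        simp [pvGoA, h1, h2]
        simpa using ih (acc ++ [l]) false

theorem pvGoA_cons_boring (x : String) (xs : List String) (hx : pvBoring x = true) :
    pvGoA (x :: xs) false = pvSummary x :: pvGoA xs true := by
  by_cases h : PySem.Str.startswith x "\tat org.gradle" = true
  · simp at h
    simp [pvGoA, pvSummary, h]
  · have hj : PySem.Str.startswith x "\tat java.base" = true := by
      rcases (by simpa [pvBoring] using hx : _ ∨ _) with hg | hj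
      · exact absurd (by simpa using hg) h
      · simpa using hj
    simp at h hj
    simp [pvGoA, pvSummary, h, hj]

theorem pvGoA_cons_boring_prev (x : String) (xs : List String) (hx : pvBoring x = true) :
    pvGoA (x :: xs) true = pvGoA xs true := by
  by_cases h : PySem.Str.startswith x "\tat org.gradle" = true
  · simp at h
    simp [pvGoA, h]
  · have hj : PySem.Str.startswith x "\tat java.base" = true := by
      rcases (by simpa [pvBoring] using hx : _ ∨ _) with hg | hj
      · exact absurd (by simpa using hg) h
      · simpa using hj
    simp at h hj
    simp [pvGoA, h, hj]

theorem pvGoA_cons_nonboring (x : String) (xs : List String) (prev : Bool)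
    (hx : pvBoring x = false) : pvGoA (x :: xs) prev = x :: pvGoA xs false := by
  have h := hx
  simp [pvBoring, Bool.or_eq_false_iff] at h
  simp [pvGoA, h.1, h.2]

theorem pvGoA_boring_run (run rest : List String) (h : ∀ y ∈ run, pvBoring y = true) :
    pvGoA (run ++ rest) true = pvGoA rest true := by
  induction run with
  | nil => simp
  | cons y ys ih =>
    rw [List.cons_append, pvGoA_cons_boring_prev y _ (h y (by simp))]
    exact ih (fun z hz => h z (by simp [hz]))

theorem pvGoA_nonboring_run (run rest : List String) (h : ∀ y ∈ run, pvBoring y = false) :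
    pvGoA (run ++ rest) false = run ++ pvGoA rest false := by
  induction run with
  | nil => simp
  | cons y ys ih =>
    rw [List.cons_append, pvGoA_cons_nonboring y _ false (h y (by simp))]
    simp only [List.cons_append]
    rw [ih (fun z hz => h z (by simp [hz]))]

theorem pvGoA_reset (rest : List String)
    (h : rest = [] ∨ ∃ y ys, rest = y :: ys ∧ pvBoring y = false) :
    pvGoA rest true = pvGoA rest false := by
  rcases h with rfl | ⟨y, ys, rfl, hy⟩
  · rfl
  · rw [pvGoA_cons_nonboring y ys true hy, pvGoA_cons_nonboring y ys false hy]

theorem pvGoA_eq_runs (lines : List String) : pvGoA lines false = pvRuns lines := by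
  match lines with
  | [] => simp [pvGoA, pvRuns]
  | x :: xs =>
    have hsplit := List.takeWhile_append_dropWhile (p := fun y => pvBoring y == pvBoring x) (l := xs)
    have hrun : ∀ y ∈ xs.takeWhile (fun y => pvBoring y == pvBoring x), pvBoring y = pvBoring x := by
      intro y hy
      have := List.mem_takeWhile_imp hy
      simpa using this
    have hlen : (xs.dropWhile (fun y => pvBoring y == pvBoring x)).length < (x :: xs).length := by
      have := List.length_dropWhile_le (fun y => pvBoring y == pvBoring x) xs
      simpa using Nat.lt_succ_of_le this
    have ih := pvGoA_eq_runs (xs.dropWhile (fun y => pvBoring y == pvBoring x))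
    have hrest : xs.dropWhile (fun y => pvBoring y == pvBoring x) = [] ∨
        ∃ y ys, xs.dropWhile (fun y => pvBoring y == pvBoring x) = y :: ys ∧ pvBoring y ≠ pvBoring x := by
      rcases h : xs.dropWhile (fun y => pvBoring y == pvBoring x) with _ | ⟨y, ys⟩
      · exact Or.inl rfl
      · refine Or.inr ⟨y, ys, rfl, ?_⟩
        have hne : (fun y => pvBoring y == pvBoring x) ((xs.dropWhile (fun y => pvBoring y == pvBoring x)).head (by simp [h])) = false :=
          List.head_dropWhile_not (p := fun y => pvBoring y == pvBoring x) (l := xs) (by simp [h])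
        simp only [h, List.head_cons] at hne
        simpa using hne
    by_cases hb : pvBoring x = true
    · rw [pvGoA_cons_boring x xs hb]
      conv_lhs => rw [← hsplit]
      rw [pvGoA_boring_run _ _ (fun y hy => (hrun y hy).trans hb)]
      rw [pvGoA_reset _ (by
        rcases hrest with h | ⟨y, ys, hys, hy⟩
        · exact Or.inl h
        · exact Or.inr ⟨y, ys, hys, by rw [hb] at hy; simpa using hy⟩)]
      rw [ih]
      simp [pvRuns, hb]
    · have hb' : pvBoring x = false := by simpa using hb
      rw [pvGoA_cons_nonboring x xs false hb']
      conv_lhs => rw [← hsplit]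
      rw [pvGoA_nonboring_run _ _ (fun y hy => (hrun y hy).trans hb')]
      rw [ih]
      simp [pvRuns, hb']
termination_by lines.length
decreasing_by
  have := List.length_dropWhile_le (fun y => pvBoring y == pvBoring x) xs
  simpa using Nat.lt_succ_of_le this


-- ===== VERDICT (by name: the statement is the Claim_ definition above) =====
theorem shorten_uninteresting_stack_frames_spec : Claim_equal_shorten_uninteresting_stack_frames := by
  intro lines _
  show shorten_uninteresting_stack_frames lines = shorten_uninteresting_stack_frames_alt lines
  unfold shorten_uninteresting_stack_frames shorten_uninteresting_stack_frames_alt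
  rw [pvFoldl_eq_goA lines [] false, pvGoA_eq_runs]
  simp
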